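-- pv_equiv track=rewrite | github.com/gabegarcia571-source/Personal-Model-Development | financial-normalizer/src/ingestion/xbrl_ingestion.py | _classify_xbrl
-- ===== SOURCE A (Python) =====
-- from typing import Any, Dict, List, Optional, Tuple
--
-- def _classify_xbrl(facts: List[Dict[str, Any]]) -> str:
--     """Classify document type based on which facts are present."""
--     names = {row["account_name"] for row in facts}
--     if {"OperatingCashFlow", "InvestingCashFlow", "FinancingCashFlow"} & names:
--         return "cash_flow"
--     if {"TotalAssets", "TotalLiabilities", "Equity"} & names:
--         return "balance_sheet"
--     if {"Revenue", "GrossProfit", "NetIncome"} & names: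
--         return "income_statement"
--     return "unknown"
-- ===== SOURCE B (Python) =====
-- _RANK = {
--     "OperatingCashFlow": 0, "InvestingCashFlow": 0, "FinancingCashFlow": 0,
--     "TotalAssets": 1, "TotalLiabilities": 1, "Equity": 1,
--     "Revenue": 2, "GrossProfit": 2, "NetIncome": 2,
-- }
-- _LABELS = ["cash_flow", "balance_sheet", "income_statement"]
--
--
-- def _classify_xbrl(facts):
--     """Classify document type based on which facts are present."""
--     names = {row["account_name"] for row in facts}
--     best = None
--     for name in names:
--         rank = _RANK.get(name)
--         if rank is not None and (best is None or rank < best):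
--             best = rank
--     return "unknown" if best is None else _LABELS[best]
-- ===== Notes on version B (the rewrite author's own statement) =====
-- stated objective: alternative
-- what changed: Replaces the cascade of three literal-set intersections with a single static name-to-priority-rank table and one scan over the present names tracking the minimum rank, indexing a label list at the end.
import Mathlib
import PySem

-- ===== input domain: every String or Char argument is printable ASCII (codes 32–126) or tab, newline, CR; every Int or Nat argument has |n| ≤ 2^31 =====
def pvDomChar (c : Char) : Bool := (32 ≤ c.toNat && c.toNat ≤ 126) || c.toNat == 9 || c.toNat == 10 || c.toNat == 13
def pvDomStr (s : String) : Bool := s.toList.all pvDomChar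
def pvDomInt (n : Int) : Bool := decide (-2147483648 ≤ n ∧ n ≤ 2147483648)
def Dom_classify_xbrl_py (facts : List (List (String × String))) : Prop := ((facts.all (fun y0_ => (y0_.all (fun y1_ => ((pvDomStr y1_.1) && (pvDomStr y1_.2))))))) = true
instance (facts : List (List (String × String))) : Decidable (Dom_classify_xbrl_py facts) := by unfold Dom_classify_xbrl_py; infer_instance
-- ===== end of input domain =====

-- B replaces A's cascade of three set-intersection tests by a static name→priority-rank
-- table scanned once for the minimum rank present (alternative decomposition, same cost).


-- ===== PORT A =====
-- names = {row["account_name"] for row in facts}; missing key (KeyError) excluded by Pre_,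
-- the port reads a default "" there. '{literal set} & names' (truthiness of the
-- intersection) is ported exactly as membership of each literal in names.
def classify_xbrl_py (facts : List (List (String × String))) : String :=
  let names : PySem.Set String :=
    PySem.Set.ofList (facts.map (fun row => ((PySem.Dict.mk row).get? "account_name").getD ""))
  if names.contains "OperatingCashFlow" || names.contains "InvestingCashFlow" ||
     names.contains "FinancingCashFlow" then "cash_flow"
  else if names.contains "TotalAssets" || names.contains "TotalLiabilities" ||
          names.contains "Equity" then "balance_sheet"
  else if names.contains "Revenue" || names.contains "GrossProfit" ||
          names.contains "NetIncome" then "income_statement"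
  else "unknown"

-- ===== PORT B =====
def pvRankTable : PySem.Dict String Int := PySem.Dict.mk
  [("OperatingCashFlow", 0), ("InvestingCashFlow", 0), ("FinancingCashFlow", 0),
   ("TotalAssets", 1), ("TotalLiabilities", 1), ("Equity", 1),
   ("Revenue", 2), ("GrossProfit", 2), ("NetIncome", 2)]

def pvLabels : List String := ["cash_flow", "balance_sheet", "income_statement"]

-- the for-loop over the set: a fold tracking the minimum rank (order-independent result)
def classify_xbrl_py_alt (facts : List (List (String × String))) : String :=
  let names : PySem.Set String :=
    PySem.Set.ofList (facts.map (fun row => ((PySem.Dict.mk row).get? "account_name").getD ""))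
  let best : Option Int := names.foldl
    (fun best name =>
      match pvRankTable.get? name with
      | none => best
      | some r => match best with
        | none => some r
        | some b => if r < b then some r else best) none
  match best with
  | none => "unknown"
  | some b => (PySem.List.pyGet? pvLabels b).getD ""

-- ===== PRECONDITION & SPEC =====
-- Pre_ excludes exactly the inputs where A raises KeyError: a row without an "account_name" key.
def Pre_classify_xbrl_py (facts : List (List (String × String))) : Prop :=
  ∀ row ∈ facts, ((PySem.Dict.mk row).get? "account_name").isSome = true
instance (facts : List (List (String × String))) : Decidable (Pre_classify_xbrl_py facts) := by unfold Pre_classify_xbrl_py; infer_instance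
def pvWitness_classify_xbrl_py : (List (List (String × String))) :=
  [[("account_name", "Revenue"), ("value", "3")], [("account_name", "TotalAssets")]]
def Spec_classify_xbrl_py (facts : List (List (String × String))) (out : String) : Prop := out = classify_xbrl_py_alt facts
instance (facts : List (List (String × String))) (out : String) : Decidable (Spec_classify_xbrl_py facts out) := by unfold Spec_classify_xbrl_py; infer_instance

-- ===== CLAIM (what is proved, stated in full; the proofs are below) =====
def Claim_equal_classify_xbrl_py : Prop := ∀ (facts : List (List (String × String))), Dom_classify_xbrl_py facts → Pre_classify_xbrl_py facts → Spec_classify_xbrl_py facts (classify_xbrl_py facts)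

-- ===== LEMMAS AND PROOFS =====

-- the loop body of B's fold, abstracted: merge an accumulator with one looked-up rank
def pvStep (best : Option Int) (r? : Option Int) : Option Int :=
  match r? with
  | none => best
  | some r => match best with
    | none => some r
    | some b => if r < b then some r else best

-- the minimum rank present in a list of names, expressed through the three membership tests
def pvBest (ns : List String) : Option Int :=
  if ns.contains "OperatingCashFlow" || ns.contains "InvestingCashFlow" ||
     ns.contains "FinancingCashFlow" then some 0
  else if ns.contains "TotalAssets" || ns.contains "TotalLiabilities" ||
          ns.contains "Equity" then some 1
  else if ns.contains "Revenue" || ns.contains "GrossProfit" ||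
          ns.contains "NetIncome" then some 2
  else none

theorem pvStep_assoc (a x y : Option Int) :
    pvStep (pvStep a x) y = pvStep a (pvStep x y) := by
  rcases a with _ | a <;> rcases x with _ | x <;> rcases y with _ | y <;>
    simp only [pvStep] <;> split_ifs <;> simp <;>
    (try split_ifs) <;> simp_all <;> omega

theorem pvStep_none_left (y : Option Int) : pvStep none y = y := by
  rcases y with _ | y <;> rfl

theorem pvBest_cons (n : String) (ns : List String) :
    pvBest (n :: ns) = pvStep (pvRankTable.get? n) (pvBest ns) := by
  by_cases h1 : ("OperatingCashFlow" : String) = n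
  · subst h1
    simp only [pvBest, List.contains_cons, pvRankTable, PySem.Dict.get?_mk_cons]
    norm_num
    split_ifs <;> simp_all [pvStep]
  by_cases h2 : ("InvestingCashFlow" : String) = n
  · subst h2
    simp only [pvBest, List.contains_cons, pvRankTable, PySem.Dict.get?_mk_cons]
    norm_num
    split_ifs <;> simp_all [pvStep]
  by_cases h3 : ("FinancingCashFlow" : String) = n
  · subst h3
    simp only [pvBest, List.contains_cons, pvRankTable, PySem.Dict.get?_mk_cons]
    norm_num
    split_ifs <;> simp_all [pvStep]
  by_cases h4 : ("TotalAssets" : String) = n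
  · subst h4
    simp only [pvBest, List.contains_cons, pvRankTable, PySem.Dict.get?_mk_cons]
    norm_num
    split_ifs <;> simp_all [pvStep]
  by_cases h5 : ("TotalLiabilities" : String) = n
  · subst h5
    simp only [pvBest, List.contains_cons, pvRankTable, PySem.Dict.get?_mk_cons]
    norm_num
    split_ifs <;> simp_all [pvStep]
  by_cases h6 : ("Equity" : String) = n
  · subst h6
    simp only [pvBest, List.contains_cons, pvRankTable, PySem.Dict.get?_mk_cons]
    norm_num
    split_ifs <;> simp_all [pvStep]
  by_cases h7 : ("Revenue" : String) = n
  · subst h7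
    simp only [pvBest, List.contains_cons, pvRankTable, PySem.Dict.get?_mk_cons]
    norm_num
    split_ifs <;> simp_all [pvStep]
  by_cases h8 : ("GrossProfit" : String) = n
  · subst h8
    simp only [pvBest, List.contains_cons, pvRankTable, PySem.Dict.get?_mk_cons]
    norm_num
    split_ifs <;> simp_all [pvStep]
  by_cases h9 : ("NetIncome" : String) = n
  · subst h9
    simp only [pvBest, List.contains_cons, pvRankTable, PySem.Dict.get?_mk_cons]
    norm_num
    split_ifs <;> simp_all [pvStep]
  have e : pvRankTable.get? n = none := by
    simp [pvRankTable, PySem.Dict.get?, h1, h2, h3, h4, h5, h6, h7, h8, h9]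
  rw [e, pvStep_none_left]
  simp only [pvBest, List.contains_cons]
  have : ∀ m : String, ¬ m = n → (m == n) = false := fun m h => by simp [h]
  simp [this _ h1, this _ h2, this _ h3, this _ h4, this _ h5, this _ h6, this _ h7, this _ h8, this _ h9]

theorem foldl_pvStep (ns : List String) (acc : Option Int) :
    ns.foldl (fun best name =>
      match pvRankTable.get? name with
      | none => best
      | some r => match best with
        | none => some r
        | some b => if r < b then some r else best) acc
      = pvStep acc (pvBest ns) := by
  induction ns generalizing acc with
  | nil => simp [pvBest, pvStep]
  | cons n ns ih =>
    show List.foldl _ (pvStep acc (pvRankTable.get? n)) ns = _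
    rw [ih, pvBest_cons, ← pvStep_assoc]

-- ===== VERDICT (by name: the statement is the Claim_ definition above) =====
theorem classify_xbrl_py_spec : Claim_equal_classify_xbrl_py := by
  intro facts _ _
  show classify_xbrl_py facts = classify_xbrl_py_alt facts
  simp only [classify_xbrl_py, classify_xbrl_py_alt, foldl_pvStep, pvStep_none_left, pvBest,
    PySem.Set.contains]
  split_ifs <;> rfl
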